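-- pv_equiv track=rewrite | github.com/chloeboireaudevier/AOC-2024 | day12.py | get_regions
-- ===== SOURCE A (Python) =====
-- def get_diff_regions(data):
--     names=[]
--     for line in data:
--         for car in line:
--             if car not in names:
--                 names.append(car)
--     return names
--
-- def get_region_by_name(data,name,n,m):
--     region = [['.' for i in range(m)] for i in range(n)]
--     for i in range(n):
--         for j in range(m):
--             if data[i][j] == name:
--                 region[i][j] = name
--     return region
--
-- def get_regions(data):
--     n = len(data)
--     m = len(data[0])
--     regions = []
--     names = get_diff_regions(data)
--     for i in range(len(names)):
--         regions.append(get_region_by_name(data,names[i],n,m))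
--     return regions
-- ===== SOURCE B (Python) =====
-- def get_regions(data):
--     n = len(data)
--     m = len(data[0])
--     grids = {}
--     for line in data:
--         for car in line:
--             if car not in grids:
--                 grids[car] = [['.' for _ in range(m)] for _ in range(n)]
--     for i in range(n):
--         for j in range(m):
--             car = data[i][j]
--             grids[car][i][j] = car
--     return list(grids.values())
-- ===== Notes on version B (the rewrite author's own statement) =====
-- stated objective: alternative
-- what changed: Replaces A's per-name full-grid scan (one pass over the whole grid for each distinct character) with an insertion-ordered dict of name -> fresh grid and a single placement pass over the grid, dispatching each cell into its name's grid.
import Mathlib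
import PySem

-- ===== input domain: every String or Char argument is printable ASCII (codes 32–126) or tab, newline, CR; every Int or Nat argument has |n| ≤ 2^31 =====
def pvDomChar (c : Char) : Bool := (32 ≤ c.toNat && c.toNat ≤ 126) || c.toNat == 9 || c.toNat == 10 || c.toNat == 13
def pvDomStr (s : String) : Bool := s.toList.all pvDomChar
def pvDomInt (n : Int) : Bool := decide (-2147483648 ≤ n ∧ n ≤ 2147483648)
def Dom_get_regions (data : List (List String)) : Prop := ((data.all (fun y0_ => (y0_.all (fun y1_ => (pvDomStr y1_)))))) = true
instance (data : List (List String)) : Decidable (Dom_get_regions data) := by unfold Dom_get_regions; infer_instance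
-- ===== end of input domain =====

-- B replaces A's per-name full-grid scan with an insertion-ordered dict name -> fresh grid
-- and a single placement pass dispatching each cell into its name's grid (alternative algorithm).

-- shared transliterations of identical Python fragments:
-- [['.' for _ in range(m)] for _ in range(n)]
def pvInitGrid (n m : Nat) : List (List String) :=
  (List.range n).map (fun _ => (List.range m).map (fun _ => "."))
-- g[i][j] = v  (i, j produced by range(n)/range(m); in range under Pre_)
def pvSetCell (g : List (List String)) (i j : Nat) (v : String) : List (List String) :=
  g.set i ((g.getD i []).set j v)

-- ===== PORT A =====
def get_diff_regions (data : List (List String)) : List String :=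
  data.foldl (fun names line =>
    line.foldl (fun names car => if names.contains car then names else names ++ [car]) names) []

-- data[i][j] ported as getD: exact for the in-range indices guaranteed by Pre_
def get_region_by_name (data : List (List String)) (name : String) (n m : Nat) :
    List (List String) :=
  (List.range n).foldl (fun region i =>
    (List.range m).foldl (fun region j =>
      if (data.getD i []).getD j "" == name then pvSetCell region i j name else region) region)
    (pvInitGrid n m)

def get_regions (data : List (List String)) : List (List (List String)) :=
  let n := data.length
  let m := (data.headD []).length   -- data[0]; Pre_ requires data ≠ []
  let names := get_diff_regions data
  (List.range names.length).foldl
    (fun regions i => regions ++ [get_region_by_name data (names.getD i "") n m]) []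

-- ===== PORT B =====
def get_regions_alt (data : List (List String)) : List (List (List String)) :=
  let n := data.length
  let m := (data.headD []).length   -- data[0]; Pre_ requires data ≠ []
  let grids : PySem.Dict String (List (List String)) :=
    data.foldl (fun d line =>
      line.foldl (fun (d : PySem.Dict String (List (List String))) car =>
        if d.contains car then d else d.insert car (pvInitGrid n m)) d) PySem.Dict.empty
  let grids2 :=
    (List.range n).foldl (fun d i =>
      (List.range m).foldl (fun (d : PySem.Dict String (List (List String))) j =>
        d.modify ((data.getD i []).getD j "") []
          (fun g => pvSetCell g i j ((data.getD i []).getD j ""))) d) grids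
  grids2.values

-- ===== PRECONDITION & SPEC =====
-- Pre_ excludes exactly the inputs where A raises IndexError: empty data (data[0]),
-- and rows shorter than the first row (data[i][j] for j < m).
def Pre_get_regions (data : List (List String)) : Prop :=
  data ≠ [] ∧ ∀ row ∈ data, (data.headD []).length ≤ row.length
instance (data : List (List String)) : Decidable (Pre_get_regions data) := by
  unfold Pre_get_regions; infer_instance

def pvWitness_get_regions : List (List String) := [["A", "B"], ["B", "A"]]

def Spec_get_regions (data : List (List String)) (out : List (List (List String))) : Prop :=
  out = get_regions_alt data
instance (data : List (List String)) (out : List (List (List String))) :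
    Decidable (Spec_get_regions data out) := by unfold Spec_get_regions; infer_instance

-- ===== CLAIM (what is proved, stated in full; the proofs are below) =====
def Claim_equal_get_regions : Prop :=
  ∀ (data : List (List String)), Dom_get_regions data → Pre_get_regions data →
    Spec_get_regions data (get_regions data)

-- ===== LEMMAS AND PROOFS =====

-- A's name gathering is ordered dedup of the flattened grid.
theorem pv_names_eq (data : List (List String)) :
    get_diff_regions data = PySem.Set.ofList data.flatten := by
  unfold get_diff_regions
  have hadd : (fun (names : List String) (car : String) =>
      if names.contains car then names else names ++ [car]) = PySem.Set.add := by
    funext ns car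
    simp only [PySem.Set.add, PySem.Set.contains_eq_listContains]
    rfl
  rw [hadd]
  have hupd : ∀ (ls : List (List String)) (s : List String),
      ls.foldl (fun s line => line.foldl PySem.Set.add s) s = PySem.Set.update s ls.flatten := by
    intro ls
    induction ls with
    | nil => intro s; simp [PySem.Set.update_nil]
    | cons line rest ih =>
      intro s
      rw [List.foldl_cons, ih, List.flatten_cons, PySem.Set.update_append]
      rfl
  rw [hupd, PySem.Set.update_nil_left]

-- B's first phase builds the dict whose items are exactly A's names, each mapped to a
-- fresh grid.
theorem pv_phase1_items (data : List (List String)) (init : List (List String)) :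
    (data.foldl (fun d line =>
      line.foldl (fun (d : PySem.Dict String (List (List String))) car =>
        if d.contains car then d else d.insert car init) d) PySem.Dict.empty).items
    = (get_diff_regions data).map (fun nm => (nm, init)) := by
  have inner : ∀ (line : List String) (d : PySem.Dict String (List (List String)))
      (ns : List String), d.items = ns.map (fun nm => (nm, init)) →
      (line.foldl (fun d car => if d.contains car then d else d.insert car init) d).items
      = (line.foldl (fun names car =>
          if names.contains car then names else names ++ [car]) ns).map (fun nm => (nm, init)) := by
    intro line
    induction line with
    | nil => intro d ns h; exact h
    | cons car cs ihc =>
      intro d ns h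
      have hkeys : d.keys = ns := by
        simp [PySem.Dict.keys, h, List.map_map, Function.comp_def]
      have hcd : d.contains car = decide (car ∈ ns) := by
        rw [PySem.Dict.contains_eq_decide_mem_keys, hkeys]
      have hcn : ns.contains car = decide (car ∈ ns) := List.contains_eq_mem car ns
      simp only [List.foldl_cons]
      by_cases hm : car ∈ ns
      · rw [if_pos (by rw [hcd]; simp [hm]), if_pos (by rw [hcn]; simp [hm])]
        exact ihc d ns h
      · rw [if_neg (by rw [hcd]; simp [hm]), if_neg (by rw [hcn]; simp [hm])]
        apply ihc
        rw [PySem.Dict.items_insert_of_not_contains d init (by rw [hcd]; simp [hm]), h,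
          List.map_append]
        rfl
  induction data with
  | nil => rfl
  | cons line rest ih =>
    -- re-run the outer induction in a generalized form
    clear ih
    suffices h : ∀ (lines : List (List String)) (d : PySem.Dict String (List (List String)))
        (ns : List String), d.items = ns.map (fun nm => (nm, init)) →
        (lines.foldl (fun d line =>
          line.foldl (fun d car => if d.contains car then d else d.insert car init) d) d).items
        = (lines.foldl (fun names line =>
            line.foldl (fun names car =>
              if names.contains car then names else names ++ [car]) names) ns).map
            (fun nm => (nm, init)) by
      exact h (line :: rest) PySem.Dict.empty [] rfl
    intro lines
    induction lines with
    | nil => intro d ns h; exact h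
    | cons l ls ih2 =>
      intro d ns h
      exact ih2 _ _ (inner l d ns h)

-- a fold whose every step preserves the key list preserves it
theorem pv_keys_foldl_pointwise {α : Type} (L : List α)
    (step : PySem.Dict String (List (List String)) → α → PySem.Dict String (List (List String)))
    (ks : List String) (h : ∀ d a, a ∈ L → d.keys = ks → (step d a).keys = ks) :
    ∀ d, d.keys = ks → (L.foldl step d).keys = ks := by
  induction L with
  | nil => intro d hd; exact hd
  | cons a L ih =>
    intro d hd
    exact ih (fun d b hb => h d b (List.mem_cons_of_mem a hb)) (step d a)
      (h d a List.mem_cons_self hd)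

-- a modify-loop whose keys all lie in ks preserves the key list ks
theorem pv_keys_foldl_modify {α : Type} (L : List α) (key : α → String)
    (f : α → List (List String) → List (List String)) (ks : List String)
    (hk : ∀ a ∈ L, key a ∈ ks) :
    ∀ d : PySem.Dict String (List (List String)), d.keys = ks →
      (L.foldl (fun d a => d.modify (key a) [] (f a)) d).keys = ks := by
  apply pv_keys_foldl_pointwise
  intro d a ha hd
  rw [PySem.Dict.keys_modify, PySem.Dict.keys_insert_of_contains, hd]
  rw [PySem.Dict.contains_eq_decide_mem_keys, hd]
  simp [hk a ha]

-- reading one key through any fold whose steps act pointwise on that key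
theorem pv_getD_foldl_pointwise {α : Type} (L : List α)
    (step : PySem.Dict String (List (List String)) → α → PySem.Dict String (List (List String)))
    (T : α → List (List String) → List (List String))
    (k : String) (h : ∀ d a, a ∈ L → (step d a).getD k [] = T a (d.getD k [])) :
    ∀ d, (L.foldl step d).getD k [] = L.foldl (fun g a => T a g) (d.getD k []) := by
  induction L with
  | nil => intro d; rfl
  | cons a L ih =>
    intro d
    rw [List.foldl_cons, List.foldl_cons,
      ih (fun d b hb => h d b (List.mem_cons_of_mem a hb)), h d a List.mem_cons_self]

-- reading one key through a modify-loop
theorem pv_getD_foldl_modify {α : Type} (L : List α) (key : α → String)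
    (f : α → List (List String) → List (List String)) (k : String) :
    ∀ d : PySem.Dict String (List (List String)),
      (L.foldl (fun d a => d.modify (key a) [] (f a)) d).getD k []
      = L.foldl (fun g a => if key a = k then f a g else g) (d.getD k []) := by
  apply pv_getD_foldl_pointwise
  intro d a _
  rw [PySem.Dict.getD_modify]
  by_cases h : key a = k
  · simp [h]
  · simp [h, Ne.symm h]

-- A's per-name scan, with the placed value rewritten from name to the (equal) cell value
theorem pv_region_eq (data : List (List String)) (nm : String) (n m : Nat) :
    get_region_by_name data nm n m
    = (List.range n).foldl (fun g i =>
        (List.range m).foldl (fun g j =>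
          if (data.getD i []).getD j "" = nm then
            pvSetCell g i j ((data.getD i []).getD j "") else g) g) (pvInitGrid n m) := by
  unfold get_region_by_name
  congr 1
  funext g i
  congr 1
  funext g' j
  by_cases h : (data.getD i []).getD j "" = nm
  · rw [h]; simp
  · rw [if_neg (by simpa using h), if_neg h]

-- index-driven append loop over names = map over names
theorem pv_range_getD_map {γ : Type} (ns : List String) (F : String → γ) :
    (List.range ns.length).foldl (fun rs i => rs ++ [F (ns.getD i "")]) [] = ns.map F := by
  rw [PySem.List.foldl_append_singleton_eq_map (fun i => F (ns.getD i "")), List.nil_append]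
  apply List.ext_getElem
  · simp
  · intro i h1 h2
    simp only [List.getElem_map, List.getElem_range]
    rw [List.getD_eq_getElem ns "" (by simpa using h1)]

-- ===== VERDICT (by name: the statement is the Claim_ definition above) =====
theorem get_regions_spec : Claim_equal_get_regions := by
  intro data _ hpre
  obtain ⟨hne, hrow⟩ := hpre
  unfold Spec_get_regions
  simp only [get_regions, get_regions_alt]
  set n := data.length with hn
  set m := (data.headD []).length with hm
  set names := get_diff_regions data with hnamesdef
  set init := pvInitGrid n m with hinit
  have hnames : names = PySem.Set.ofList data.flatten := pv_names_eq data
  have hnd : names.Nodup := by rw [hnames]; exact PySem.Set.nodup_ofList _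
  set grids := data.foldl (fun d line =>
    line.foldl (fun (d : PySem.Dict String (List (List String))) car =>
      if d.contains car then d else d.insert car init) d) PySem.Dict.empty with hgrids
  have hitems1 : grids.items = names.map (fun nm => (nm, init)) := pv_phase1_items data init
  have hkeys1 : grids.keys = names := by
    simp [PySem.Dict.keys, hitems1, List.map_map, Function.comp_def]
  have hv : ∀ i ∈ List.range n, ∀ j ∈ List.range m,
      (data.getD i []).getD j "" ∈ names := by
    intro i hi j hj
    rw [List.mem_range] at hi hj
    rw [hnames, PySem.Set.mem_ofList]
    apply List.mem_flatten.mpr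
    refine ⟨data.getD i [], ?_, ?_⟩
    · rw [List.getD_eq_getElem data [] hi]
      exact List.getElem_mem hi
    · have hlen : m ≤ (data.getD i []).length := by
        apply hrow
        rw [List.getD_eq_getElem data [] hi]
        exact List.getElem_mem hi
      rw [List.getD_eq_getElem _ "" (lt_of_lt_of_le hj hlen)]
      exact List.getElem_mem _
  set grids2 := (List.range n).foldl (fun d i =>
    (List.range m).foldl (fun (d : PySem.Dict String (List (List String))) j =>
      d.modify ((data.getD i []).getD j "") []
        (fun g => pvSetCell g i j ((data.getD i []).getD j ""))) d) grids with hgrids2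
  have hkeys2 : grids2.keys = names := by
    apply pv_keys_foldl_pointwise _ _ names _ grids hkeys1
    intro d i hi hd
    exact pv_keys_foldl_modify (List.range m) _ _ names (fun j hj => hv i hi j hj) d hd
  have hval : ∀ nm ∈ names, grids2.getD nm [] = get_region_by_name data nm n m := by
    intro nm hnm
    rw [hgrids2, pv_getD_foldl_pointwise (List.range n) _
      (fun i g => (List.range m).foldl (fun g j =>
        if (data.getD i []).getD j "" = nm then
          pvSetCell g i j ((data.getD i []).getD j "") else g) g) nm
      (fun d i _ => pv_getD_foldl_modify (List.range m)
        (fun j => (data.getD i []).getD j "")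
        (fun j g => pvSetCell g i j ((data.getD i []).getD j "")) nm d) grids]
    have hinitval : grids.getD nm [] = init := by
      apply PySem.Dict.getD_of_mem_items
      · rw [hitems1]
        exact List.mem_map.mpr ⟨nm, hnm, rfl⟩
      · rw [hkeys1]; exact hnd
    rw [hinitval, pv_region_eq]
  rw [PySem.Dict.values_eq_map_keys grids2 (by rw [hkeys2]; exact hnd) [], hkeys2,
    pv_range_getD_map names (fun s => get_region_by_name data s n m)]
  exact (List.map_congr_left (fun nm hnm => hval nm hnm)).symm
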